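-- pv_equiv track=rewrite | github.com/anutishna/onto_tool | text_processor.py | get_collocations
-- ===== SOURCE A (Python) =====
-- def get_collocations(tokens, x):
--     """Выявление цепочки токенов заданной длины"""
--     collocations = []
--     i = 0
--     while i < len(tokens) - (x - 1):
--         collocation = tokens[i:i + x]
--         collocations.append(collocation)
--         i += 1
--
--     punct_marks = [' ', '.', ',', '!', '?', ':', ';', '-', '«', '»', '"', '…', '(', ')', '/', "''"]
--     filtered_colls = []
--     for col in collocations:
--         is_col = True
--         for pm in punct_marks:
--             if pm in col:
--                 is_col = False
--         if is_col:
--             filtered_colls.append(col)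
--     return filtered_colls
-- ===== SOURCE B (Python) =====
-- PUNCT_MARKS = {' ', '.', ',', '!', '?', ':', ';', '-', '«', '»', '"', '…', '(', ')', '/', "''"}
--
-- def get_collocations(tokens, x):
--     """Sliding x-token windows without punctuation, tested in O(1) per window
--     via a prefix-sum of punctuation counts. Windows of non-positive length do
--     not exist, so x < 1 yields []."""
--     if x < 1:
--         return []
--     c = 0
--     bad = [0]
--     for t in tokens:
--         c += t in PUNCT_MARKS
--         bad.append(c)
--     n = len(tokens)
--     out = []
--     for i in range(n - x + 1):
--         if bad[i + x] == bad[i]: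
--             out.append(tokens[i:i + x])
--     return out
-- ===== Notes on version B (the rewrite author's own statement) =====
-- stated objective: faster
-- what changed: Replaces the per-window scan over the 16 punctuation marks with a one-pass prefix-sum of punctuation counts, so each sliding window is tested in O(1); for x < 1 B returns [] since no window of positive length exists.
-- intended difference: For x <= 0 A returns a non-empty list of degenerate windows (empty slices, and for negative x slices created by negative-slice-bound wraparound) that all pass its punctuation filter; B returns [], the intended value since there are no windows of non-positive length. — e.g. on get_collocations(["a"], 0): A returns [[], []], B returns []
import Mathlib
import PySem

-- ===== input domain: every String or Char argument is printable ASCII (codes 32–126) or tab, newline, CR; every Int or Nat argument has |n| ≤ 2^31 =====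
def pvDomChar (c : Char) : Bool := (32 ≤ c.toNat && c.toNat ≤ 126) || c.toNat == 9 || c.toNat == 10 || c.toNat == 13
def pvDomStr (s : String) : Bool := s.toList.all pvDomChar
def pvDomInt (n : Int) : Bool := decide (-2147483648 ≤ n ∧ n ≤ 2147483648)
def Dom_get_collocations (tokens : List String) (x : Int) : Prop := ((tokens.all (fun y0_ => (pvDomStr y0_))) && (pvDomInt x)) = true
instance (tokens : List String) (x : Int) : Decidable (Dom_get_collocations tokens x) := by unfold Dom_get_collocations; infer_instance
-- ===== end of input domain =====

-- B is a prefix-sum re-implementation (O(n + output) instead of A's per-window scans);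
-- for x ≤ 0 it returns [] (no windows of non-positive length exist) where A returns degenerate slices — see D_ below.

-- ===== PORT A =====
def get_collocations (tokens : List String) (x : Int) : List (List String) :=
  -- while i < len(tokens) - (x - 1): collocations.append(tokens[i:i+x]); i += 1
  let collocations :=
    (PySem.List.pyRange 0 ((tokens.length : Int) - (x - 1)) 1).foldl
      (fun acc i => acc ++ [PySem.List.slice tokens (some i) (some (i + x))]) []
  let punct_marks : List String :=
    [" ", ".", ",", "!", "?", ":", ";", "-", "«", "»", "\"", "…", "(", ")", "/", "''"]
  collocations.foldl
    (fun acc col =>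
      let is_col := punct_marks.foldl (fun b pm => if col.contains pm then false else b) true
      if is_col then acc ++ [col] else acc) []

-- ===== PORT B =====
def pvPunctSet : PySem.Set String :=
  PySem.Set.ofList [" ", ".", ",", "!", "?", ":", ";", "-", "«", "»", "\"", "…", "(", ")", "/", "''"]

def get_collocations_alt (tokens : List String) (x : Int) : List (List String) :=
  if x < 1 then []
  else
    -- c = 0; bad = [0]; for t in tokens: c += t in PUNCT_MARKS; bad.append(c)
    let bad := (tokens.foldl
      (fun (s : Int × List Int) t =>
        let c := s.1 + (if PySem.Set.contains pvPunctSet t then 1 else 0)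
        (c, s.2 ++ [c])) ((0 : Int), [(0 : Int)])).2
    let n : Int := tokens.length
    (PySem.List.pyRange 0 (n - x + 1) 1).foldl
      (fun acc i =>
        if PySem.List.pyGetD bad (i + x) 0 == PySem.List.pyGetD bad i 0
        then acc ++ [PySem.List.slice tokens (some i) (some (i + x))] else acc) []

-- ===== PRECONDITION & SPEC =====
-- For x ≤ 0 A returns a non-empty list of degenerate windows (empty slices, and for negative x
-- slices created by negative-slice-bound wraparound) that all pass its punctuation filter;
-- B returns [], the intended value since there are no windows of non-positive length.
def D_get_collocations (tokens : List String) (x : Int) : Prop := x ≤ 0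
instance (tokens : List String) (x : Int) : Decidable (D_get_collocations tokens x) := by unfold D_get_collocations; infer_instance
def Spec_get_collocations (tokens : List String) (x : Int) (out : List (List String)) : Prop := ¬ D_get_collocations tokens x → out = get_collocations_alt tokens x
instance (tokens : List String) (x : Int) (out : List (List String)) : Decidable (Spec_get_collocations tokens x out) := by unfold Spec_get_collocations; infer_instance
def pvDiffWitness_get_collocations : List String × Int := (["a"], 0)
def pvDiffWitnessOut_get_collocations : (List (List String)) × (List (List String)) := ([[], []], [])

-- ===== CLAIM (what is proved, stated in full; the proofs are below) =====
def Claim_unchanged_get_collocations : Prop := ∀ (tokens : List String) (x : Int), Dom_get_collocations tokens x → Spec_get_collocations tokens x (get_collocations tokens x)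
def Claim_changed_get_collocations : Prop := Dom_get_collocations (pvDiffWitness_get_collocations.1) (pvDiffWitness_get_collocations.2) ∧ D_get_collocations (pvDiffWitness_get_collocations.1) (pvDiffWitness_get_collocations.2) ∧ get_collocations (pvDiffWitness_get_collocations.1) (pvDiffWitness_get_collocations.2) = pvDiffWitnessOut_get_collocations.1 ∧ get_collocations_alt (pvDiffWitness_get_collocations.1) (pvDiffWitness_get_collocations.2) = pvDiffWitnessOut_get_collocations.2 ∧ pvDiffWitnessOut_get_collocations.1 ≠ pvDiffWitnessOut_get_collocations.2
def Claim_exact_get_collocations : Prop := ∀ (tokens : List String) (x : Int), Dom_get_collocations tokens x → D_get_collocations tokens x → get_collocations tokens x ≠ get_collocations_alt tokens x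

-- ===== LEMMAS AND PROOFS =====

-- A's punctuation-mark list, as a proof-side name
def pvLits : List String :=
  [" ", ".", ",", "!", "?", ":", ";", "-", "«", "»", "\"", "…", "(", ")", "/", "''"]

-- the punctuation test B uses
def pvP (t : String) : Bool := PySem.Set.contains pvPunctSet t

-- A's inner flag loop is an `all` over the punctuation marks
lemma pvFoldPunct (L : List String) (col : List String) (b : Bool) :
    L.foldl (fun b pm => if col.contains pm then false else b) b
      = (b && L.all (fun pm => !col.contains pm)) := by
  induction L generalizing b with
  | nil => simp
  | cons pm L ih =>
      simp only [List.foldl_cons, List.all_cons, ih]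
      by_cases h : col.contains pm = true <;> simp [Bool.and_assoc, Bool.and_comm]

lemma pvP_eq (t : String) : pvP t = pvLits.contains t := by
  have h : pvPunctSet = pvLits := by decide
  simp [pvP, PySem.Set.contains, h]

-- "no punctuation mark occurs in col" = "no token of col is a punctuation mark"
lemma pvDisjoint (col : List String) :
    pvLits.all (fun pm => !col.contains pm) = col.all (fun t => !pvP t) := by
  rw [Bool.eq_iff_iff]
  simp only [List.all_eq_true, Bool.not_eq_eq_eq_not, Bool.not_true, Bool.eq_false_iff,
    ne_eq, List.contains_eq_mem, decide_eq_true_eq, pvP_eq]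
  constructor
  · intro h t ht hmem; exact h t hmem ht
  · intro h pm hpm hmem; exact h pm hmem hpm

-- A rewritten: filter the windows by "punctuation-free"
lemma pvA_eq (tokens : List String) (x : Int) :
    get_collocations tokens x
      = ((PySem.List.pyRange 0 ((tokens.length : Int) - (x - 1)) 1).filter
          (fun i => (PySem.List.slice tokens (some i) (some (i + x))).all (fun t => !pvP t))).map
          (fun i => PySem.List.slice tokens (some i) (some (i + x))) := by
  simp only [get_collocations, PySem.List.foldl_append_singleton_eq_map,
    PySem.List.foldl_append_if_eq_filter, List.nil_append, List.filter_map]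
  congr 1
  apply List.filter_congr
  intro i _
  have h := pvFoldPunct pvLits (PySem.List.slice tokens (some i) (some (i + x))) true
  simp only [pvLits] at h
  simp only [Function.comp_apply, h, Bool.true_and]
  have h2 := pvDisjoint (PySem.List.slice tokens (some i) (some (i + x)))
  simp only [pvLits] at h2
  exact h2

-- B's prefix-sum loop computes the punctuation counts of all prefixes
lemma pvBadFold (tokens : List String) (c : Int) (acc : List Int) :
    (tokens.foldl
      (fun (s : Int × List Int) t =>
        let c := s.1 + (if PySem.Set.contains pvPunctSet t then 1 else 0)
        (c, s.2 ++ [c])) (c, acc)).2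
    = acc ++ (List.range tokens.length).map
        (fun k => c + ((tokens.take (k + 1)).countP pvP : Int)) := by
  induction tokens generalizing c acc with
  | nil => simp
  | cons t ts ih =>
      simp only [List.foldl_cons]
      rw [ih]
      rw [List.length_cons, List.range_succ_eq_map, List.map_cons, List.map_map,
        List.append_assoc]
      congr 1
      rw [List.singleton_append]
      congr 1
      · simp only [List.take_succ_cons, List.take_zero, List.countP_cons, List.countP_nil, pvP]
        by_cases h : PySem.Set.contains pvPunctSet t = true <;> simp
      · apply List.map_congr_left
        intro k _
        simp only [Function.comp_apply, List.take_succ_cons, List.countP_cons, pvP,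
          Nat.succ_eq_add_one]
        by_cases h : PySem.Set.contains pvPunctSet t = true <;>
          simp only [h, if_true] <;> push_cast <;> ring

lemma pvBadEq (tokens : List String) :
    (tokens.foldl
      (fun (s : Int × List Int) t =>
        let c := s.1 + (if PySem.Set.contains pvPunctSet t then 1 else 0)
        (c, s.2 ++ [c])) ((0 : Int), [(0 : Int)])).2
    = (List.range (tokens.length + 1)).map (fun k => ((tokens.take k).countP pvP : Int)) := by
  rw [pvBadFold, List.range_succ_eq_map, List.map_cons, List.map_map]
  simp [Function.comp_def]

-- window test equivalence: prefix-sum difference zero ↔ window punctuation-free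
lemma pvWindow (tokens : List String) (k m : Nat) :
    ((((tokens.take (k + m)).countP pvP : Int)) == ((tokens.take k).countP pvP : Int))
      = ((tokens.drop k).take m).all (fun t => !pvP t) := by
  rw [Bool.eq_iff_iff, beq_iff_eq, List.take_add, List.countP_append]
  push_cast
  rw [List.all_eq_true]
  constructor
  · intro h
    have hb : ((tokens.drop k).take m).countP pvP = 0 := by omega
    rw [List.countP_eq_zero] at hb
    intro t ht; simpa using hb t ht
  · intro h
    have hb : ((tokens.drop k).take m).countP pvP = 0 := by
      rw [List.countP_eq_zero]; intro t ht; simpa using h t ht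
    rw [hb]; simp

-- B rewritten (x = m ≥ 1): filter the window starts by prefix-sum difference zero
lemma pvB_eq (tokens : List String) (m : Nat) (hm : 1 ≤ m) :
    get_collocations_alt tokens (m : Int)
      = ((PySem.List.pyRange 0 ((tokens.length : Int) - (m : Int) + 1) 1).filter
          (fun i => (PySem.List.slice tokens (some i) (some (i + (m : Int)))).all (fun t => !pvP t))).map
          (fun i => PySem.List.slice tokens (some i) (some (i + (m : Int)))) := by
  have hnot : ¬ ((m : Int) < 1) := by exact_mod_cast Nat.not_lt.mpr hm
  simp only [get_collocations_alt, if_neg hnot, pvBadEq, PySem.List.foldl_append_if,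
    List.nil_append]
  congr 1
  apply List.filter_congr
  intro i hi
  rw [PySem.List.mem_pyRange_one] at hi
  obtain ⟨k, rfl⟩ : ∃ k : Nat, i = (k : Int) := ⟨i.toNat, (Int.toNat_of_nonneg hi.1).symm⟩
  have hkm : k + m ≤ tokens.length := by omega
  have h1 : ((k : Int) + (m : Int)) = ((k + m : Nat) : Int) := by push_cast; ring
  rw [h1, PySem.List.pyGetD_of_nonneg _ _ (by positivity),
    PySem.List.pyGetD_of_nonneg _ _ (by positivity), Int.toNat_natCast, Int.toNat_natCast,
    PySem.List.getD_map_range _ _ _ _ (by omega), PySem.List.getD_map_range _ _ _ _ (by omega),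
    pvWindow]
  rw [← h1, PySem.List.slice_natCast_add]

-- ===== VERDICT (by name: the statement is the Claim_ definition above) =====
theorem get_collocations_spec : Claim_unchanged_get_collocations := by
  intro tokens x _ hD
  have hx : 1 ≤ x := by
    simp only [D_get_collocations] at hD; omega
  obtain ⟨m, rfl⟩ : ∃ m : Nat, x = (m : Int) := ⟨x.toNat, (Int.toNat_of_nonneg (by omega)).symm⟩
  have hm : 1 ≤ m := by exact_mod_cast hx
  rw [pvA_eq, pvB_eq tokens m hm]
  have hr : ((tokens.length : Int) - ((m : Int) - 1)) = (tokens.length : Int) - (m : Int) + 1 := by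
    ring
  rw [hr]

theorem get_collocations_changed : Claim_changed_get_collocations := by
  unfold Claim_changed_get_collocations; decide

theorem get_collocations_tight : Claim_exact_get_collocations := by
  intro tokens x _ hD
  simp only [D_get_collocations] at hD
  have hB : get_collocations_alt tokens x = [] := by
    simp only [get_collocations_alt, if_pos (by omega : x < 1)]
  rw [hB, pvA_eq]
  intro hA
  have hmem : ([] : List String) ∈
      ((PySem.List.pyRange 0 ((tokens.length : Int) - (x - 1)) 1).filter
        (fun i => (PySem.List.slice tokens (some i) (some (i + x))).all (fun t => !pvP t))).map
        (fun i => PySem.List.slice tokens (some i) (some (i + x))) := by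
    rw [List.mem_map]
    refine ⟨(tokens.length : Int) - x, ?_, ?_⟩
    · rw [List.mem_filter]
      constructor
      · rw [PySem.List.mem_pyRange_one]
        constructor
        · have : (0 : Int) ≤ (tokens.length : Int) := by positivity
          omega
        · omega
      · have hw : PySem.List.slice tokens (some ((tokens.length : Int) - x))
            (some ((tokens.length : Int) - x + x)) = [] := by
          have h1 : ((tokens.length : Int) - x) = ((tokens.length + (-x).toNat : Nat) : Int) := by
            push_cast; omega
          have h2 : ((tokens.length : Int) - x + x) = ((tokens.length : Nat) : Int) := by ring
          rw [h2, h1, PySem.List.slice_natCast, List.drop_eq_nil_of_le (by omega), List.take_nil]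
        rw [hw]; rfl
    · have h1 : ((tokens.length : Int) - x) = ((tokens.length + (-x).toNat : Nat) : Int) := by
        push_cast; omega
      have h2 : ((tokens.length : Int) - x + x) = ((tokens.length : Nat) : Int) := by ring
      rw [h2, h1, PySem.List.slice_natCast, List.drop_eq_nil_of_le (by omega), List.take_nil]
  rw [hA] at hmem
  simp at hmem
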